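-- pv_equiv track=rewrite | github.com/MorphoCity/morpheo-plugin | morpheo/core/edge_properties.py | iter_places
-- ===== SOURCE A (Python) =====
-- def iter_places(rows):
--     """ Generator for iterating throught places
--
--         :param rows: A ordered list of squences whose first element
--                      is an place index which is the sort
--                      criteria. Thus, element which have the same index
--                      are all adjacent in the list.
--
--         At each invocation, the iterator return a tuple (place,list)
--         where place is the place index and list the list of elements
--         for the same index.
--     """
--     s = 0
--     size = len(rows)
--     def takew(p,s):
--         while s<size:
--             x = rows[s]
--             if x[0]==p:
--                 yield x
--                 s = s+1
--             else:
--                 break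
--
--     while s<size:
--         p = rows[s][0]
--         l = list(takew(p,s))
--         s = s+len(l)
--         yield p,l
-- ===== SOURCE B (Python) =====
-- def iter_places(rows):
--     """Single linear pass: accumulate the current group and flush it when
--     the first-element key changes (and once more at the end)."""
--     key = None
--     group = []
--     for x in rows:
--         k = x[0]
--         if group and k == key:
--             group.append(x)
--         else:
--             if group:
--                 yield key, group
--             key = k
--             group = [x]
--     if group:
--         yield key, group
-- ===== Notes on version B (the rewrite author's own statement) =====
-- stated objective: simpler
-- what changed: Replaces A's index arithmetic with a rescanning inner takew generator by one linear pass that accumulates the current group and flushes it when the key changes.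
import Mathlib
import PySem

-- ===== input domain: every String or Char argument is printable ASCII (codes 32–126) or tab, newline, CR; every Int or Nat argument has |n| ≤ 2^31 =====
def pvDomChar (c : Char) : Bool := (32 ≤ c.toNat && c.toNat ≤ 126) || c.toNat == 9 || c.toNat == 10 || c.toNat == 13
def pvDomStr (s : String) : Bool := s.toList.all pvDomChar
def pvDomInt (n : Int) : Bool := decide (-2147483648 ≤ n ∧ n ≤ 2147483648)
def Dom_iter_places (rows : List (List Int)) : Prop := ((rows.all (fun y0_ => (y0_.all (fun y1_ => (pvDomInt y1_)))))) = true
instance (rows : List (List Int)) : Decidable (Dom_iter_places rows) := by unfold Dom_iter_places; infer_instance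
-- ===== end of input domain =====

-- B replaces A's index-tracking loop with rescanning inner generator by one
-- linear pass with a current-group accumulator (objective: simpler).
-- Both programs raise IndexError on an empty inner row, excluded by Pre_.

-- ===== PORT A =====
-- x[0] of a row (rows are nonempty under Pre_; 0 is an arbitrary default outside it)
def key0 (x : List Int) : Int := x.headD 0

-- inner generator takew(p, s): collect rows[s], rows[s+1], … while first element == p
def takewA (rows : List (List Int)) (p : Int) (s : Nat) : List (List Int) :=
  if h : s < rows.length then
    let x := rows[s]
    if key0 x = p then x :: takewA rows p (s + 1) else []
  else []
termination_by rows.length - s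

theorem takewA_pos (rows : List (List Int)) (p : Int) (s : Nat)
    (hs : s < rows.length) (hp : key0 rows[s] = p) :
    0 < (takewA rows p s).length := by
  rw [takewA]; simp [hs, hp]

-- outer while loop: p = rows[s][0]; l = list(takew(p,s)); s += len(l); yield (p, l)
def loopA (rows : List (List Int)) (s : Nat) : List (Int × List (List Int)) :=
  if h : s < rows.length then
    let p := key0 rows[s]
    let l := takewA rows p s
    (p, l) :: loopA rows (s + l.length)
  else []
termination_by rows.length - s
decreasing_by
  have := takewA_pos rows (key0 rows[s]) s h rfl
  omega

def iter_places (rows : List (List Int)) : List (Int × List (List Int)) :=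
  loopA rows 0

-- ===== PORT B =====
-- accumulator loop: extend the current group while the key repeats, flush on change
def goB (key : Int) (group : List (List Int)) :
    List (List Int) → List (Int × List (List Int))
  | [] => [(key, group.reverse)]
  | x :: rest =>
      if key0 x = key then goB key (x :: group) rest
      else (key, group.reverse) :: goB (key0 x) [x] rest

def iter_places_alt (rows : List (List Int)) : List (Int × List (List Int)) :=
  match rows with
  | [] => []
  | x :: rest => goB (key0 x) [x] rest

-- ===== PRECONDITION & SPEC =====
-- Pre_ excludes inputs containing an empty inner row: there rows[s][0] / x[0]
-- raises IndexError in A and in B alike.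
def Pre_iter_places (rows : List (List Int)) : Prop :=
  ∀ r ∈ rows, r ≠ []
instance (rows : List (List Int)) : Decidable (Pre_iter_places rows) := by
  unfold Pre_iter_places; infer_instance

def pvWitness_iter_places : List (List Int) := [[1, 5], [1, 6], [2, 7]]

def Spec_iter_places (rows : List (List Int)) (out : List (Int × List (List Int))) : Prop := out = iter_places_alt rows
instance (rows : List (List Int)) (out : List (Int × List (List Int))) : Decidable (Spec_iter_places rows out) := by unfold Spec_iter_places; infer_instance

-- ===== CLAIM (what is proved, stated in full; the proofs are below) =====
def Claim_equal_iter_places : Prop := ∀ (rows : List (List Int)), Dom_iter_places rows → Pre_iter_places rows → Spec_iter_places rows (iter_places rows)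

-- ===== LEMMAS AND PROOFS =====

-- takewA scans the suffix rows.drop s, i.e. it is takeWhile on that suffix
theorem takewA_eq_takeWhile (rows : List (List Int)) (p : Int) (s : Nat) :
    takewA rows p s = (rows.drop s).takeWhile (fun x => key0 x = p) := by
  by_cases h : s < rows.length
  · rw [takewA]
    have hd : rows.drop s = rows[s] :: rows.drop (s + 1) :=
      List.drop_eq_getElem_cons h
    rw [hd]
    by_cases hp : key0 rows[s] = p
    · rw [takewA_eq_takeWhile rows p (s + 1), List.takeWhile_cons]
      simp [h, hp]
    · simp [h, hp, List.takeWhile_cons]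
  · rw [takewA]
    simp [h, List.drop_eq_nil_of_le (le_of_not_gt h)]
termination_by rows.length - s

theorem dropWhile_eq_drop_len (p : List Int → Bool) (l : List (List Int)) :
    l.dropWhile p = l.drop (l.takeWhile p).length := by
  induction l with
  | nil => simp
  | cons x xs ih =>
      by_cases hx : p x
      · simp [List.dropWhile_cons, List.takeWhile_cons, hx, ih]
      · simp [List.dropWhile_cons, List.takeWhile_cons, hx]

-- goB after having accumulated 'group' (reversed) under key 'key'
theorem goB_eq (key : Int) (group : List (List Int)) (l : List (List Int)) :
    goB key group l =
      (key, group.reverse ++ l.takeWhile (fun x => key0 x = key)) ::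
        iter_places_alt (l.dropWhile (fun x => key0 x = key)) := by
  induction l generalizing group with
  | nil => simp [goB, iter_places_alt]
  | cons x xs ih =>
      by_cases hx : key0 x = key
      · simp only [goB, hx, if_pos, List.takeWhile_cons, List.dropWhile_cons,
          decide_true, decide_eq_true_eq]
        rw [ih]
        simp [hx]
      · simp [goB, hx, List.takeWhile_cons, List.dropWhile_cons, iter_places_alt]

-- main loop invariant: loopA from index s computes B's grouping of the suffix
theorem loopA_eq_alt (rows : List (List Int)) (s : Nat) :
    loopA rows s = iter_places_alt (rows.drop s) := by
  by_cases h : s < rows.length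
  · rw [loopA]
    have hd : rows.drop s = rows[s] :: rows.drop (s + 1) :=
      List.drop_eq_getElem_cons h
    simp only [h, dif_pos]
    set p := key0 rows[s] with hp
    set l := takewA rows p s with hl
    have hlen : 0 < l.length := takewA_pos rows p s h rfl
    have hrec : loopA rows (s + l.length) = iter_places_alt (rows.drop (s + l.length)) :=
      loopA_eq_alt rows (s + l.length)
    rw [hrec]
    have htw : l = rows[s] :: (rows.drop (s + 1)).takeWhile (fun x => key0 x = p) := by
      rw [hl, takewA_eq_takeWhile, hd, List.takeWhile_cons]
      simp [hp]
    conv_rhs => rw [hd]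
    show _ = goB (key0 rows[s]) [rows[s]] (rows.drop (s + 1))
    rw [goB_eq, ← hp]
    have hdrop : (rows.drop (s + 1)).dropWhile (fun x => key0 x = p) =
        rows.drop (s + l.length) := by
      rw [dropWhile_eq_drop_len, List.drop_drop]
      congr 1
      have : l.length = ((rows.drop (s + 1)).takeWhile (fun x => key0 x = p)).length + 1 := by
        rw [htw]; simp
      omega
    rw [hdrop, htw]
    simp
  · rw [loopA]
    simp [h, List.drop_eq_nil_of_le (le_of_not_gt h), iter_places_alt]
termination_by rows.length - s
decreasing_by
  have := takewA_pos rows (key0 rows[s]) s h rfl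
  omega

-- ===== VERDICT (by name: the statement is the Claim_ definition above) =====
theorem iter_places_spec : Claim_equal_iter_places := by
  intro rows _ _
  unfold Spec_iter_places iter_places
  simpa using loopA_eq_alt rows 0
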